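-- pv_equiv track=rewrite | github.com/JackDanger/gzippy | scripts/convert_isal_tables.py | to_rust_array
-- ===== SOURCE A (Python) =====
-- def infer_rust_type(values: list[int]) -> str:
--     """Infer the appropriate Rust type for the values."""
--     max_val = max(values) if values else 0
--     if max_val <= 0xFF:
--         return "u8"
--     elif max_val <= 0xFFFF:
--         return "u16"
--     else:
--         return "u32"
--
-- def to_rust_array(name: str, values: list[int], rust_type: str = None) -> str:
--     """Convert values to a Rust const array."""
--     if rust_type is None:
--         rust_type = infer_rust_type(values)
--
--     rust_name = name.upper()
--
--     lines = []
--     for i in range(0, len(values), 8):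
--         chunk = values[i:i+8]
--         if rust_type == "u8":
--             line = ", ".join(f"0x{v:02x}" for v in chunk)
--         elif rust_type == "u16":
--             line = ", ".join(f"0x{v:04x}" for v in chunk)
--         else:
--             line = ", ".join(f"0x{v:08x}" for v in chunk)
--         lines.append(f"    {line},")
--
--     values_str = "\n".join(lines)
--     return f"pub const {rust_name}: [{rust_type}; {len(values)}] = [\n{values_str}\n];"
-- ===== SOURCE B (Python) =====
-- def to_rust_array(name: str, values: list[int], rust_type: str = None) -> str:
--     """Convert values to a Rust const array (single-pass row accumulator)."""
--     if rust_type is None: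
--         m = max(values, default=0)
--         rust_type = "u8" if m <= 0xFF else "u16" if m <= 0xFFFF else "u32"
--     width = 2 if rust_type == "u8" else 4 if rust_type == "u16" else 8
--     tokens = [f"0x{v:0{width}x}" for v in values]
--     lines = []
--     row = []
--     for t in tokens:
--         row.append(t)
--         if len(row) == 8:
--             lines.append("    " + ", ".join(row) + ",")
--             row = []
--     if row:
--         lines.append("    " + ", ".join(row) + ",")
--     return f"pub const {name.upper()}: [{rust_type}; {len(values)}] = [\n" + "\n".join(lines) + "\n];"
-- ===== Notes on version B (the rewrite author's own statement) =====
-- stated objective: simpler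
-- what changed: B resolves the per-type hex width once up front, formats all values in a single pass, and groups the token stream into rows of 8 with a single-pass accumulator that flushes full rows, instead of A's index-slicing loop re-deciding the type branch per chunk.
import Mathlib
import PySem

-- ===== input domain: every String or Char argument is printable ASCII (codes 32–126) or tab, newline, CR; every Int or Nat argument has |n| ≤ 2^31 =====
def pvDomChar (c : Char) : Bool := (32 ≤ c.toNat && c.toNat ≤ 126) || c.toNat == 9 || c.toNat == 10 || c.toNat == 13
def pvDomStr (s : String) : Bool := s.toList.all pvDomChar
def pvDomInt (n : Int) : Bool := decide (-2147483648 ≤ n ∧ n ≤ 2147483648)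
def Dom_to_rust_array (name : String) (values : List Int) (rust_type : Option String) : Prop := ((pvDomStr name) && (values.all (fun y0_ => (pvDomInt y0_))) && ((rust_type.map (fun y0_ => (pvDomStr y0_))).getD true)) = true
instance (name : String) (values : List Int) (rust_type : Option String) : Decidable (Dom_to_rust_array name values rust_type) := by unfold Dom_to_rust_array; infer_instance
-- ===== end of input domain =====

-- B reformulates A: the per-type format width is resolved once, all values are
-- formatted in one pass, and rows of 8 are built by a single-pass accumulator
-- instead of index slicing (objective: simpler decomposition, not faster).

-- shared helper: Python's f"0x{v:0{w}x}" (hex of |v|, sign in front, zero-padded to width w)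
def pvHexNat (n : Nat) : String := String.ofList (Nat.toDigits 16 n)
def pvHexFmt (w : Nat) (v : Int) : String :=
  "0x" ++ PySem.Str.zfill (if v < 0 then "-" ++ pvHexNat (-v).toNat else pvHexNat v.toNat) (w : Int)

-- shared helper: the expression "    " + ", ".join(row) + "," both Pythons contain
def pvRowLine (row : List String) : String := "    " ++ PySem.Str.join ", " row ++ ","

-- ===== PORT A =====
def infer_rust_type (values : List Int) : String :=
  let max_val : Int := if values.isEmpty then 0 else (PySem.List.max? values (fun x => x)).getD 0
  if max_val ≤ 0xFF then "u8"
  else if max_val ≤ 0xFFFF then "u16"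
  else "u32"

-- the loop 'for i in range(0, len(values), 8)' of A, as recursion on the index i
def to_rust_array_loop (rt : String) (values : List Int) (lines : List String) (i : Nat) : List String :=
  if _h : i < values.length then
    let chunk := PySem.List.slice values (some (i : Int)) (some ((i : Int) + 8))
    let line :=
      if rt == "u8" then PySem.Str.join ", " (chunk.map (pvHexFmt 2))
      else if rt == "u16" then PySem.Str.join ", " (chunk.map (pvHexFmt 4))
      else PySem.Str.join ", " (chunk.map (pvHexFmt 8))
    to_rust_array_loop rt values (lines ++ ["    " ++ line ++ ","]) (i + 8)
  else lines
termination_by values.length - i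

def to_rust_array (name : String) (values : List Int) (rust_type : Option String) : String :=
  let rt := match rust_type with
    | none => infer_rust_type values
    | some s => s
  let rust_name := PySem.Str.upper name
  let lines := to_rust_array_loop rt values [] 0
  let values_str := PySem.Str.join "\n" lines
  "pub const " ++ rust_name ++ ": [" ++ rt ++ "; " ++ PySem.Int.toStr (values.length : Int) ++ "] = [\n" ++ values_str ++ "\n];"

-- ===== PORT B =====
-- one step of B's row accumulator: append the token, flush the row at 8
def alt_step (p : List String × List String) (t : String) : List String × List String :=
  let row := p.2 ++ [t]
  if row.length == 8 then (p.1 ++ [pvRowLine row], []) else (p.1, row)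

def to_rust_array_alt (name : String) (values : List Int) (rust_type : Option String) : String :=
  let rt := match rust_type with
    | none =>
      let m : Int := (PySem.List.max? values (fun x => x)).getD 0
      if m ≤ 0xFF then "u8" else if m ≤ 0xFFFF then "u16" else "u32"
    | some s => s
  let width : Nat := if rt == "u8" then 2 else if rt == "u16" then 4 else 8
  let tokens := values.map (pvHexFmt width)
  let p := tokens.foldl alt_step ([], [])
  let lines := if p.2.isEmpty then p.1 else p.1 ++ [pvRowLine p.2]
  "pub const " ++ PySem.Str.upper name ++ ": [" ++ rt ++ "; " ++ PySem.Int.toStr (values.length : Int) ++ "] = [\n" ++ PySem.Str.join "\n" lines ++ "\n];"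

-- ===== PRECONDITION & SPEC =====
def Spec_to_rust_array (name : String) (values : List Int) (rust_type : Option String) (out : String) : Prop := out = to_rust_array_alt name values rust_type
instance (name : String) (values : List Int) (rust_type : Option String) (out : String) : Decidable (Spec_to_rust_array name values rust_type out) := by unfold Spec_to_rust_array; infer_instance

-- ===== CLAIM (what is proved, stated in full; the proofs are below) =====
def Claim_equal_to_rust_array : Prop := ∀ (name : String) (values : List Int) (rust_type : Option String), Dom_to_rust_array name values rust_type → Spec_to_rust_array name values rust_type (to_rust_array name values rust_type)

-- ===== LEMMAS AND PROOFS =====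

-- canonical form: rows of 8, mapped to lines
def chunkLines (ts : List String) : List String :=
  match ts with
  | [] => []
  | t :: rest => pvRowLine ((t :: rest).take 8) :: chunkLines ((t :: rest).drop 8)
termination_by ts.length
decreasing_by simp [List.length_drop]

def pvWidth (rt : String) : Nat := if rt == "u8" then 2 else if rt == "u16" then 4 else 8

lemma lineA_eq (rt : String) (chunk : List Int) :
    (if rt == "u8" then PySem.Str.join ", " (chunk.map (pvHexFmt 2))
     else if rt == "u16" then PySem.Str.join ", " (chunk.map (pvHexFmt 4))
     else PySem.Str.join ", " (chunk.map (pvHexFmt 8)))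
    = PySem.Str.join ", " (chunk.map (pvHexFmt (pvWidth rt))) := by
  unfold pvWidth; split_ifs <;> rfl

lemma chunkLines_ne_nil (ts : List String) (h : ts ≠ []) :
    chunkLines ts = pvRowLine (ts.take 8) :: chunkLines (ts.drop 8) := by
  cases ts with
  | nil => exact absurd rfl h
  | cons t rest => rw [chunkLines]

lemma loopA_eq (rt : String) : ∀ (n : Nat) (values : List Int) (i : Nat) (lines : List String),
    values.length - i ≤ n →
    to_rust_array_loop rt values lines i
      = lines ++ chunkLines ((values.drop i).map (pvHexFmt (pvWidth rt))) := by
  intro n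
  induction n with
  | zero =>
    intro values i lines h
    have hge : values.length ≤ i := by omega
    rw [to_rust_array_loop, dif_neg (by omega)]
    simp [List.drop_eq_nil_of_le hge, chunkLines]
  | succ n ih =>
    intro values i lines h
    rw [to_rust_array_loop]
    by_cases hlt : i < values.length
    · rw [dif_pos hlt]
      simp only [lineA_eq]
      have hs : PySem.List.slice values (some (i : Int)) (some ((i : Int) + 8))
          = (values.drop i).take 8 := by simpa using PySem.List.slice_natCast_add values i 8
      rw [hs, ih values (i + 8) _ (by omega)]
      have hne : ((values.drop i).map (pvHexFmt (pvWidth rt))) ≠ [] := by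
        simp [List.drop_eq_nil_iff]; omega
      rw [chunkLines_ne_nil _ hne]
      rw [← List.map_take, ← List.map_drop, List.drop_drop]
      simp [pvRowLine, List.append_assoc]
    · rw [dif_neg hlt]
      have hge : values.length ≤ i := by omega
      simp [List.drop_eq_nil_of_le hge, chunkLines]

lemma foldB_eq : ∀ (ts : List String) (lines row : List String), row.length < 8 →
    (if (ts.foldl alt_step (lines, row)).2.isEmpty then (ts.foldl alt_step (lines, row)).1
     else (ts.foldl alt_step (lines, row)).1 ++ [pvRowLine (ts.foldl alt_step (lines, row)).2])
      = lines ++ chunkLines (row ++ ts) := by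
  intro ts
  induction ts with
  | nil =>
    intro lines row hrow
    cases row with
    | nil => simp [chunkLines]
    | cons r rest =>
      rw [chunkLines_ne_nil _ (by simp)]
      have htake : (r :: rest).take 8 = r :: rest :=
        List.take_of_length_le (Nat.le_of_lt hrow)
      have hdrop : (r :: rest).drop 8 = [] :=
        List.drop_eq_nil_of_le (Nat.le_of_lt hrow)
      simp [htake, hdrop, chunkLines]
  | cons t ts ih =>
    intro lines row hrow
    simp only [List.foldl_cons]
    by_cases h8 : (row ++ [t]).length = 8
    · have hstep : alt_step (lines, row) t = (lines ++ [pvRowLine (row ++ [t])], []) := by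
        simp [alt_step, h8]
      rw [hstep, ih _ [] (by simp)]
      rw [show row ++ t :: ts = (row ++ [t]) ++ ts by simp]
      rw [chunkLines_ne_nil ((row ++ [t]) ++ ts) (by simp)]
      rw [List.take_left' h8, List.drop_left' h8]
      simp [List.append_assoc]
    · have hlt : (row ++ [t]).length < 8 := by
        simp only [List.length_append, List.length_singleton] at h8 ⊢; omega
      have hstep : alt_step (lines, row) t = (lines, row ++ [t]) := by
        simp only [alt_step]
        rw [if_neg (by simpa using h8)]
      rw [hstep, ih _ _ hlt]
      simp [List.append_assoc]

lemma infer_eq (values : List Int) :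
    infer_rust_type values =
      (if (PySem.List.max? values (fun x => x)).getD 0 ≤ 0xFF then "u8"
       else if (PySem.List.max? values (fun x => x)).getD 0 ≤ 0xFFFF then "u16" else "u32") := by
  cases values with
  | nil => simp [infer_rust_type, PySem.List.max?]
  | cons v rest => simp [infer_rust_type]

lemma eq_some (name : String) (values : List Int) (s : String) :
    to_rust_array name values (some s) = to_rust_array_alt name values (some s) := by
  simp only [to_rust_array, to_rust_array_alt]
  rw [loopA_eq s values.length values 0 [] (by omega),
      foldB_eq (values.map (pvHexFmt (if s == "u8" then 2 else if s == "u16" then 4 else 8))) [] []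
        (by simp)]
  simp [pvWidth]

lemma main_eq (name : String) (values : List Int) (rust_type : Option String) :
    to_rust_array name values rust_type = to_rust_array_alt name values rust_type := by
  cases rust_type with
  | some s => exact eq_some name values s
  | none =>
    simp only [to_rust_array, to_rust_array_alt]
    rw [← infer_eq]
    rw [loopA_eq (infer_rust_type values) values.length values 0 [] (by omega)]
    rw [foldB_eq (values.map (pvHexFmt
          (if infer_rust_type values == "u8" then 2
           else if infer_rust_type values == "u16" then 4 else 8))) [] [] (by simp)]
    simp [pvWidth]

-- ===== VERDICT (by name: the statement is the Claim_ definition above) =====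
theorem to_rust_array_spec : Claim_equal_to_rust_array := by
  intro name values rust_type _
  unfold Spec_to_rust_array
  exact main_eq name values rust_type
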